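-- pv_equiv track=rewrite | github.com/rdinesh808/pylogicalprograms | pylogicalprograms/patterns/DineshNamePattern.py | print_i
-- ===== SOURCE A (Python) =====
-- def print_i(size):
--     start = 1
--     end = size + 1
--     middle = end // 2
--     i_lines = []
--     for i in range(start, end):
--         line = ""
--         for j in range(start, end):
--             if i == start or i == size or j == middle:
--                 line += "* "
--             else:
--                 line += "  "
--         i_lines.append(line)
--     return i_lines
-- ===== SOURCE B (Python) =====
-- def print_i(size):
--     if size <= 0:
--         return []
--     edge = "* " * size
--     middle = (size + 1) // 2
--     inner = "  " * (middle - 1) + "* " + "  " * (size - middle)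
--     return [edge if i == 0 or i == size - 1 else inner for i in range(size)]
-- ===== Notes on version B (the rewrite author's own statement) =====
-- stated objective: faster
-- what changed: Drops A's inner per-column loop: the three distinct line kinds are each built once by string multiplication and the row list is a comprehension choosing between the two precomputed strings, so no per-cell conditional append happens at all.
import Mathlib
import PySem

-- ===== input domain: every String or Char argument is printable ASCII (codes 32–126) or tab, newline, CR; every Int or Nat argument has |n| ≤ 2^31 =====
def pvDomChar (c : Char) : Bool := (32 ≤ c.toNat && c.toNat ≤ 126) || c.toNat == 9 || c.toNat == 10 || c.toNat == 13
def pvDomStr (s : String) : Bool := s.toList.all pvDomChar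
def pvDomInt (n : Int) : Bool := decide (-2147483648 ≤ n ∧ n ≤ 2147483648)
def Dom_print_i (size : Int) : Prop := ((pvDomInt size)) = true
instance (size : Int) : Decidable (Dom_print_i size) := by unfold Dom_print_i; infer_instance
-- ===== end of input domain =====

-- B replaces A's inner per-column loop by precomputed string repetitions (simpler decomposition).

-- ===== PORT A =====
def print_i (size : Int) : List String :=
  let start : Int := 1
  let stop : Int := size + 1
  let middle : Int := PySem.Int.floordiv stop 2
  (PySem.List.pyRange start stop 1).foldl (fun i_lines i =>
    i_lines ++ [(PySem.List.pyRange start stop 1).foldl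
      (fun line j =>
        if i == start || i == size || j == middle then line ++ "* " else line ++ "  ") ""])
    []

-- ===== PORT B =====
-- python's  s * n  on a string
def strMul (s : String) (n : Int) : String := String.ofList (PySem.List.pyRepeat s.toList n)

def print_i_alt (size : Int) : List String :=
  if size ≤ 0 then []
  else
    let edge := strMul "* " size
    let middle := PySem.Int.floordiv (size + 1) 2
    let inner := strMul "  " (middle - 1) ++ "* " ++ strMul "  " (size - middle)
    (PySem.List.pyRange 0 size 1).map (fun i => if i == 0 || i == size - 1 then edge else inner)

-- ===== PRECONDITION & SPEC =====
def Spec_print_i (size : Int) (out : List String) : Prop := out = print_i_alt size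
instance (size : Int) (out : List String) : Decidable (Spec_print_i size out) := by unfold Spec_print_i; infer_instance

-- ===== CLAIM (what is proved, stated in full; the proofs are below) =====
def Claim_equal_print_i : Prop := ∀ (size : Int), Dom_print_i size → Spec_print_i size (print_i size)

-- ===== LEMMAS AND PROOFS =====

-- the inner foldl of A, read on char lists: init followed by one 2-char cell per range element
lemma innerA_toList (P : Int → Bool) (l : List Int) (init : String) :
    (l.foldl (fun line j => if P j then line ++ "* " else line ++ "  ") init).toList
      = init.toList ++ (l.map (fun j => if P j then "* ".toList else "  ".toList)).flatten := by
  induction l generalizing init with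
  | nil => simp
  | cons x xs ih =>
    simp only [List.foldl_cons, List.map_cons, List.flatten_cons]
    by_cases h : P x = true
    · rw [h]; simp [ih, String.toList_append]
    · rw [Bool.not_eq_true] at h; rw [h]; simp [ih, String.toList_append]

-- a constant-valued map flattens like a replicate of the list's length
lemma flatten_constN {α β : Type} (cs : List α) (l : List β) :
    (l.map (fun _ => cs)).flatten = (List.replicate l.length cs).flatten := by
  induction l with
  | nil => rfl
  | cons x xs ih => simp [List.replicate_succ]

lemma print_i_eq_alt (size : Int) : print_i size = print_i_alt size := by
  unfold print_i print_i_alt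
  by_cases hs : size ≤ 0
  · simp [hs, PySem.List.pyRange_one_eq_nil (by omega : size + 1 ≤ (1:Int))]
  · rw [if_neg hs]
    have hm : PySem.Int.floordiv (size + 1) 2 = (size + 1) / 2 :=
      PySem.Int.floordiv_eq_ediv_of_pos (by omega)
    set middle := PySem.Int.floordiv (size + 1) 2 with hmdef
    have hm1 : 1 ≤ middle := by omega
    have hm2 : middle ≤ size := by omega
    rw [PySem.List.foldl_append_singleton_eq_map]
    rw [PySem.List.pyRange_one 1 (size+1), PySem.List.pyRange_one 0 size]
    have hN : (size + 1 - 1).toNat = (size - 0).toNat := by omega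
    rw [hN]
    simp only [List.map_map]
    apply List.map_congr_left
    intro k hk
    have hkn : (k : Int) < size := by
      have := List.mem_range.mp hk; omega
    simp only [Function.comp_apply]
    apply String.toList_inj.mp
    rw [innerA_toList (fun j => 1 + (k:Int) == 1 || 1 + (k:Int) == size || j == middle)]
    by_cases hedge : (k = 0 ∨ (k : Int) = size - 1)
    · -- edge row
      have hmap : ∀ j, (if (1 + (k:Int) == 1 || 1 + (k:Int) == size || j == middle) = true
          then "* ".toList else "  ".toList) = "* ".toList := by
        intro j
        have hc : (1 + (k:Int) == 1 || 1 + (k:Int) == size || j == middle) = true := by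
          simp only [Bool.or_eq_true, beq_iff_eq]
          rcases hedge with h0 | h1
          · exact Or.inl (Or.inl (by omega))
          · exact Or.inl (Or.inr (by omega))
        rw [hc]; simp
      have hsel : ((0:Int) + k == 0 || (0:Int) + k == size - 1) = true := by
        simp only [Bool.or_eq_true, beq_iff_eq]
        rcases hedge with h0 | h1
        · exact Or.inl (by omega)
        · exact Or.inr (by omega)
      rw [hsel]
      simp only [List.map_map]
      simp only [Function.comp_def, hmap]
      rw [flatten_constN]
      simp [strMul, PySem.List.pyRepeat]
    · -- middle row
      have h0 : k ≠ 0 := fun h => hedge (Or.inl h)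
      have h1 : (k:Int) ≠ size - 1 := fun h => hedge (Or.inr h)
      have hsel : ((0:Int) + k == 0 || (0:Int) + k == size - 1) = false := by
        simp only [Bool.or_eq_false_iff, beq_eq_false_iff_ne, ne_eq]
        exact ⟨by omega, by omega⟩
      rw [hsel]
      simp only [Bool.false_eq_true, if_false]
      have hmap : ∀ j, (if (1 + (k:Int) == 1 || 1 + (k:Int) == size || j == middle) = true
          then "* ".toList else "  ".toList)
          = if (j == middle) = true then "* ".toList else "  ".toList := by
        intro j
        have e1 : (1 + (k:Int) == 1) = false := by simp only [beq_eq_false_iff_ne, ne_eq]; omega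
        have e2 : (1 + (k:Int) == size) = false := by simp only [beq_eq_false_iff_ne, ne_eq]; omega
        rw [e1, e2]; simp
      simp only [List.map_map, Function.comp_def, hmap]
      have hsplit : (size - 0).toNat = ((middle - 1).toNat + 1) + (size - middle).toNat := by omega
      rw [hsplit, List.range_add, List.range_succ]
      simp only [List.map_append, List.map_cons, List.flatten_append, List.flatten_cons,
        List.map_map, Function.comp_def]
      have hA : ∀ x ∈ List.range (middle - 1).toNat,
          (if (1 + (x:Int) == middle) = true then "* ".toList else "  ".toList) = "  ".toList := by
        intro x hx; have := List.mem_range.mp hx; rw [if_neg]; simp; omega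
      have hMid : (1 + (((middle - 1).toNat : Nat) : Int) == middle) = true := by
        simp only [beq_iff_eq]; omega
      have hB : ∀ x ∈ List.range (size - middle).toNat,
          (if (1 + ((((middle - 1).toNat + 1) + x : Nat) : Int) == middle) = true
            then "* ".toList else "  ".toList) = "  ".toList := by
        intro x hx; have := List.mem_range.mp hx; rw [if_neg]; simp; omega
      rw [List.map_congr_left hA, List.map_congr_left hB, hMid]
      simp only [if_true]
      rw [flatten_constN, flatten_constN]
      simp [strMul, PySem.List.pyRepeat, String.toList_append]

-- ===== VERDICT (by name: the statement is the Claim_ definition above) =====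
theorem print_i_spec : Claim_equal_print_i := by
  intro size _
  exact print_i_eq_alt size
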